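-- pv_equiv track=rewrite | github.com/jspsych/jsPsych | docs/__generator__/utils.py | convert_blockquote_admonitions
-- ===== SOURCE A (Python) =====
-- def convert_blockquote_admonitions(input: str):
--     """
--     Replace blockquote-based admonitions with MkDocs' admonition style
--     """
--     lines = input.split("\n")
--     is_blockquote = False
--     for index, line in enumerate(lines):
--         if line.startswith("> **"):
--             lines[index] = "!!! " + line[2:].replace("**", "")
--             is_blockquote = True
--
--         elif is_blockquote:
--             if line.startswith(">"):
--                 lines[index] = "    " + line[2:]
--             else:
--                 is_blockquote = False
--
--     return "\n".join(lines)
-- ===== SOURCE B (Python) =====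
-- import re
--
-- _ADMONITION = re.compile(r"^> \*\*.*(?:\n>(?! \*\*).*)*", re.MULTILINE)
--
--
-- def _replace(match):
--     header, *rest = match.group(0).split("\n")
--     out = ["!!! " + header[2:].replace("**", "")]
--     out.extend("    " + line[2:] for line in rest)
--     return "\n".join(out)
--
--
-- def convert_blockquote_admonitions(input: str):
--     """
--     Replace blockquote-based admonitions with MkDocs' admonition style
--     """
--     return _ADMONITION.sub(_replace, input)
-- ===== Notes on version B (the rewrite author's own statement) =====
-- stated objective: idiomatic
-- what changed: Replaces A's mutable boolean-state scan over an indexed line list with a single re.sub(MULTILINE) that matches each admonition block (header line plus its run of continuation lines) and rewrites the whole block in a replacement function.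
import Mathlib
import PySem

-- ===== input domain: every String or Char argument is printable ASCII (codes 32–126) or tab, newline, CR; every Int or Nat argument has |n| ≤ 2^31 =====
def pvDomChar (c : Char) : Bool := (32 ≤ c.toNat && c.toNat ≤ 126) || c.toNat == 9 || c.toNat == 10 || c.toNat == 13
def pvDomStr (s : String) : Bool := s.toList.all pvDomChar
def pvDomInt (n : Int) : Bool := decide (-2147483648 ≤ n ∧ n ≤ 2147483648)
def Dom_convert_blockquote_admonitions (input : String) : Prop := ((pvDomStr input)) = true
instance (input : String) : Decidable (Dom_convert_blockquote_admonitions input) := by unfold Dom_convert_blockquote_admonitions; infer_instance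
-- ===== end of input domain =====

-- B replaces A's boolean-state line scan with a single re.sub over header-plus-continuation
-- blocks (objective: idiomatic); return values proved equal on the whole domain.

-- ===== PORT A =====
-- One fold over the split lines; the accumulator is (rewritten lines so far, is_blockquote),
-- exactly A's indexed loop (each lines[index] write only touches the line just read).
def convAStep (acc : List (List Char) × Bool) (line : List Char) :
    List (List Char) × Bool :=
  if PySem.Chars.startswith line ('>' :: ' ' :: '*' :: '*' :: []) then
    (acc.1 ++ [('!' :: '!' :: '!' :: ' ' :: []) ++
      PySem.Chars.replace (PySem.List.slice line (some 2) none) ('*' :: '*' :: []) [] ], true)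
  else if acc.2 then
    (if PySem.Chars.startswith line ('>' :: []) then
      (acc.1 ++ [(' ' :: ' ' :: ' ' :: ' ' :: []) ++ PySem.List.slice line (some 2) none], true)
    else
      (acc.1 ++ [line], false))
  else
    (acc.1 ++ [line], false)

def convert_blockquote_admonitions (input : String) : String :=
  let lines := PySem.Chars.splitOn input.toList ('\n' :: [])
  String.ofList (PySem.Chars.join ('\n' :: [])
    ((lines.foldl convAStep ([], false)).1))

-- ===== PORT B =====
-- Source B uses re.sub(r"^> \*\*.*(?:\n>(?! \*\*).*)*", …, input, re.MULTILINE).  PySem has no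
-- regex engine, so the sub is ported by hand, step for step, at the line level — exact
-- because '^' (MULTILINE) anchors matches at line starts, '.' never crosses '\n', and re.sub
-- scans left to right without overlap: goB scans for the next header line ('> **...'), and
-- contB consumes the match's zero-or-more continuation lines ('>...' but not '> **...'),
-- applying Source B's _replace transforms; a non-matching line ends the match and scanning resumes.
mutual
  def goB : List (List Char) → List (List Char)
    | [] => []
    | l :: ls =>
      if PySem.Chars.startswith l ('>' :: ' ' :: '*' :: '*' :: []) then
        (('!' :: '!' :: '!' :: ' ' :: []) ++
          PySem.Chars.replace (PySem.List.slice l (some 2) none) ('*' :: '*' :: []) [])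
          :: contB ls
      else l :: goB ls

  def contB : List (List Char) → List (List Char)
    | [] => []
    | l :: ls =>
      if PySem.Chars.startswith l ('>' :: ' ' :: '*' :: '*' :: []) then
        -- an interior header line ends the previous match and starts a new one
        (('!' :: '!' :: '!' :: ' ' :: []) ++
          PySem.Chars.replace (PySem.List.slice l (some 2) none) ('*' :: '*' :: []) [])
          :: contB ls
      else if PySem.Chars.startswith l ('>' :: []) then
        ((' ' :: ' ' :: ' ' :: ' ' :: []) ++ PySem.List.slice l (some 2) none) :: contB ls
      else l :: goB ls
end

def convert_blockquote_admonitions_alt (input : String) : String :=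
  String.ofList (PySem.Chars.join ('\n' :: [])
    (goB (PySem.Chars.splitOn input.toList ('\n' :: []))))

-- ===== PRECONDITION & SPEC =====
def Spec_convert_blockquote_admonitions (input : String) (out : String) : Prop := out = convert_blockquote_admonitions_alt input
instance (input : String) (out : String) : Decidable (Spec_convert_blockquote_admonitions input out) := by unfold Spec_convert_blockquote_admonitions; infer_instance

-- ===== CLAIM (what is proved, stated in full; the proofs are below) =====
def Claim_equal_convert_blockquote_admonitions : Prop := ∀ (input : String), Dom_convert_blockquote_admonitions input → Spec_convert_blockquote_admonitions input (convert_blockquote_admonitions input)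

-- ===== LEMMAS AND PROOFS =====

-- A's fold from state (acc, b) produces acc followed by B's block scan (in mode b).
theorem foldA_eq_goB (ls : List (List Char)) :
    ∀ (acc : List (List Char)) (b : Bool),
      (ls.foldl convAStep (acc, b)).1 = acc ++ (if b then contB ls else goB ls) := by
  induction ls with
  | nil => intro acc b; cases b <;> simp [goB, contB]
  | cons l ls ih =>
    intro acc b
    cases b <;>
      simp only [List.foldl_cons, convAStep, goB, contB] <;>
      split_ifs <;> simp_all [ih, goB, contB]

-- ===== VERDICT (by name: the statement is the Claim_ definition above) =====
theorem convert_blockquote_admonitions_spec : Claim_equal_convert_blockquote_admonitions := by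
  intro input _
  unfold Spec_convert_blockquote_admonitions convert_blockquote_admonitions
    convert_blockquote_admonitions_alt
  simp [foldA_eq_goB]
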